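-- pv_equiv track=rewrite | github.com/gandastik/365Challenge | 365Challenge/nextToAnd.py | nextToAnd
-- ===== SOURCE A (Python) =====
-- def nextToAnd(string: str) -> str:
--     count = 0
--     if(len(string) != 5): return "Error"
--     for i in string:
--         if( i == '&') : count += 1
--     if(count > 1 or count == 0): return "Error"
--     a = string[string.index("&")-1]
--     if(string.index("&") < len(string)-1):
--         b = string[string.index("&")+1]
--     else: return a
--     b = string[string.index("&")+1]
--     if(string.index("&") > 0):
--         a = string[string.index("&")-1]
--     else: return b
--     if(a == b): return a
--     else: return a + "," + b
-- ===== SOURCE B (Python) =====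
-- def nextToAnd(string: str) -> str:
--     if len(string) != 5 or string.count('&') != 1:
--         return "Error"
--     neighbors = [x if y == '&' else y for x, y in zip(string, string[1:]) if '&' in (x, y)]
--     if len(set(neighbors)) == 1:
--         return neighbors[0]
--     return ','.join(neighbors)
-- ===== Notes on version B (the rewrite author's own statement) =====
-- stated objective: alternative
-- what changed: A locates '&' with repeated index() calls and branches on its position; B never computes an index: it slides a window over adjacent pairs (zip with the shifted string), collects each pair-member next to '&', deduplicates with a set to collapse the equal/single-neighbor cases, and comma-joins otherwise.
import Mathlib
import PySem

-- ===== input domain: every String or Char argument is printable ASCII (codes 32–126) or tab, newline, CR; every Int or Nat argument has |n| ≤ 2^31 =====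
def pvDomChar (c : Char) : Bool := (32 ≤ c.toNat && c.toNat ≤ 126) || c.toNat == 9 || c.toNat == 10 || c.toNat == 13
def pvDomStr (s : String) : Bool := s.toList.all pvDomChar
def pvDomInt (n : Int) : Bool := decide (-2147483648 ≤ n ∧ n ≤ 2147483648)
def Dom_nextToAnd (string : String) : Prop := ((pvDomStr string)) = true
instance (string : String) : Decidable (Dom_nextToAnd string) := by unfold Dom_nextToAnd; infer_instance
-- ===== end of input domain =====

-- B replaces A's index()-based position branching by an index-free sliding-window scan over
-- adjacent pairs plus a set-based collapse of equal/single neighbors (objective: alternative).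

-- ===== PORT A =====
-- string.index("&") is only reached when count = 1, so '&' is present and PySem.Chars.find
-- (first occurrence) is exact there; every reached index is valid in Python (idx-1 ≥ -1 is a
-- legal negative index, idx+1 is guarded by idx < len-1), so pyGetD's default is never used.
def nextToAnd (string : String) : String :=
  let s := string.toList
  let count : Int := s.foldl (fun c i => if i = '&' then c + 1 else c) 0
  if s.length ≠ 5 then "Error"
  else if count > 1 ∨ count = 0 then "Error"
  else
    let a := PySem.List.pyGetD s (PySem.Chars.find s ['&'] - 1) ' '
    if PySem.Chars.find s ['&'] < (s.length : Int) - 1 then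
      let b := PySem.List.pyGetD s (PySem.Chars.find s ['&'] + 1) ' '
      if PySem.Chars.find s ['&'] > 0 then
        if a = b then String.ofList [a] else String.ofList [a, ',', b]
      else String.ofList [b]
    else String.ofList [a]

-- ===== PORT B =====
-- zip(string, string[1:]) → s.zip (s.drop 1); the comprehension's filter+map stay filter+map;
-- len(set(neighbors)) → (PySem.Set.ofList neighbors).length; ','.join → PySem.Chars.join.
def nextToAnd_alt (string : String) : String :=
  let s := string.toList
  if s.length ≠ 5 ∨ PySem.Chars.count s ['&'] ≠ 1 then "Error"
  else
    let neighbors := ((s.zip (s.drop 1)).filter (fun p => p.1 = '&' ∨ p.2 = '&')).map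
        (fun p => if p.2 = '&' then p.1 else p.2)
    if (PySem.Set.ofList neighbors).length = 1 then
      String.ofList [PySem.List.pyGetD neighbors 0 ' ']
    else String.ofList (PySem.Chars.join [','] (neighbors.map (fun c => [c])))

-- ===== PRECONDITION & SPEC =====
def Spec_nextToAnd (string : String) (out : String) : Prop := out = nextToAnd_alt string
instance (string : String) (out : String) : Decidable (Spec_nextToAnd string out) := by unfold Spec_nextToAnd; infer_instance

-- ===== CLAIM =====
def Claim_equal_nextToAnd : Prop := ∀ (string : String), Dom_nextToAnd string → Spec_nextToAnd string (nextToAnd string)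

-- ===== LEMMAS AND PROOFS =====

theorem amp_eq_swap (c : Char) : ('&' = c) ↔ (c = '&') := eq_comm

-- collapsing two neighbors: A's a=b test vs B's set-length test produce the same string
theorem collapse (a b : Char) :
    (if a = b then String.ofList [a] else String.ofList [a, ',', b]) =
    (if List.length (if b = a then [a] else [a, b]) = 1 then String.ofList [a]
     else String.ofList ([','].intercalate [[a], [b]])) := by
  rcases eq_or_ne a b with h | h
  · subst h; simp
  · simp [h, Ne.symm h, List.intercalate]

-- the only interesting case: the string has exactly 5 characters; split on which of them equal '&'
set_option maxHeartbeats 2000000 in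
set_option maxRecDepth 8192 in
theorem nextToAnd_eq_alt_of_five (string : String) (c0 c1 c2 c3 c4 : Char)
    (hs : string.toList = [c0, c1, c2, c3, c4]) :
    nextToAnd string = nextToAnd_alt string := by
  unfold nextToAnd nextToAnd_alt
  rw [hs]
  rcases eq_or_ne c0 '&' with h0 | h0 <;> rcases eq_or_ne c1 '&' with h1 | h1 <;>
    rcases eq_or_ne c2 '&' with h2 | h2 <;> rcases eq_or_ne c3 '&' with h3 | h3 <;>
    rcases eq_or_ne c4 '&' with h4 | h4 <;>
    simp [PySem.Chars.find, PySem.Chars.find.go, PySem.Chars.count, PySem.Chars.count.go,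
      List.isPrefixOf, PySem.List.pyGetD, PySem.List.pyGet?, PySem.List.pyIdx?, PySem.Set.ofList, PySem.Set.add,
      PySem.Chars.join, h0, h1, h2, h3, h4, amp_eq_swap] <;>
    (try (exact collapse _ _))

-- ===== VERDICT =====
theorem nextToAnd_spec : Claim_equal_nextToAnd := by
  intro string _
  unfold Spec_nextToAnd
  rcases hs : string.toList with _ | ⟨c0, _ | ⟨c1, _ | ⟨c2, _ | ⟨c3, _ | ⟨c4, _ | ⟨c5, rest⟩⟩⟩⟩⟩⟩
  · simp [nextToAnd, nextToAnd_alt, hs]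
  · simp [nextToAnd, nextToAnd_alt, hs]
  · simp [nextToAnd, nextToAnd_alt, hs]
  · simp [nextToAnd, nextToAnd_alt, hs]
  · simp [nextToAnd, nextToAnd_alt, hs]
  · exact nextToAnd_eq_alt_of_five string c0 c1 c2 c3 c4 hs
  · simp [nextToAnd, nextToAnd_alt, hs]
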